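-- pv_equiv track=rewrite | github.com/sagekoala/advent-of-code-2023 | day-1/day_1.py | number_in_text_left
-- ===== SOURCE A (Python) =====
-- written_nums = ['one', 'two', 'three', 'four', 'five', 'six', 'seven', 'eight', 'nine']
--
-- def number_in_text_left(text):
--     """Reads string, returns first digit or written number from left and first from right"""
--     temp_answer = ""
--
--     # Reading each char from left, building substring, breaking if digit or numerical
--     # word is found
--     temp_str = ""
--     for char in text:
--         if (char.isnumeric()):
--             temp_answer += char
--             break
--         else:
--             temp_str += char
--             if (temp_str in written_nums):
--                 temp_answer += str((written_nums.index(temp_str) + 1))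
--                 break
--             elif (get_all_substrings(temp_str)):
--                 temp_answer += str((get_all_substrings(temp_str)))
--                 break
--
--
--     return temp_answer
--
-- def get_all_substrings(text):
--     """Build list of all possible substrings, return index if substring in written_num list"""
--
--     substr_list = []
--
--     for i in range(len(text)):
--         for j in range(i+1, len(text) + 1):
--             substr_list.append(text[i:j])
--
--     for item in substr_list:
--         if item in written_nums:
--             return (written_nums.index(item) + 1)
--
--     return 0
-- ===== SOURCE B (Python) =====
-- written_nums = ['one', 'two', 'three', 'four', 'five', 'six', 'seven', 'eight', 'nine']
--
-- def number_in_text_left(text):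
--     """Reads string, returns first digit or written number from left and first from right"""
--     prefix = ""
--     for ch in text:
--         if ch.isnumeric():
--             return ch
--         prefix += ch
--         for k, w in enumerate(written_nums):
--             if prefix.endswith(w):
--                 return str(k + 1)
--     return ""
-- ===== Notes on version B (the rewrite author's own statement) =====
-- stated objective: faster
-- what changed: Instead of enumerating all O(n^2) substrings of the growing prefix at every step, B keeps the prefix and only tests whether one of the 9 fixed number words is a suffix of it (constant work per character).
import Mathlib
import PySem

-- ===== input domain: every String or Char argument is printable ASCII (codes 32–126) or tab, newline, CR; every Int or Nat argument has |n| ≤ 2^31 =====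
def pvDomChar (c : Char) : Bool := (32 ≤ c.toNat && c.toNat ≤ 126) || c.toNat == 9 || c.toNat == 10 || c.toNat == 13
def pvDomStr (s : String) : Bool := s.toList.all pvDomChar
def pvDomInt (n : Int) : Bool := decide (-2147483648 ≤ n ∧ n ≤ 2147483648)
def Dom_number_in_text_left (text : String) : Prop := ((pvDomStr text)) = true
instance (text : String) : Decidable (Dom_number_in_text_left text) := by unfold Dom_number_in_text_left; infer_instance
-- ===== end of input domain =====

-- B is a single pass keeping only the current prefix and testing the 9 fixed words as
-- suffixes, instead of A's re-enumeration of every substring of the prefix at each step.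
-- char.isnumeric() is ported as PySem.Chars.isdigit: they agree on the ASCII domain Dom_.

-- ===== PORT A =====
def writtenNums : List (List Char) :=
  [['o','n','e'], ['t','w','o'], ['t','h','r','e','e'], ['f','o','u','r'], ['f','i','v','e'],
   ['s','i','x'], ['s','e','v','e','n'], ['e','i','g','h','t'], ['n','i','n','e']]

-- helper of A: scan substr_list, return index+1 of first item in written_nums, else 0
def scanItemsA : List (List Char) → Int
  | [] => 0
  | s :: rest =>
    if s ∈ writtenNums then (((PySem.List.index? writtenNums s).getD 0 : Nat) : Int) + 1
    else scanItemsA rest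

def getAllSubstrings (t : List Char) : Int :=
  let n : Int := t.length
  let substrList :=
    (PySem.List.pyRange 0 n 1).foldl (fun acc i =>
      (PySem.List.pyRange (i + 1) (n + 1) 1).foldl
        (fun acc2 j => acc2 ++ [PySem.List.slice t (some i) (some j)]) acc) []
  scanItemsA substrList

def loopA : List Char → List Char → List Char
  | [], _ => []
  | c :: rest, tempStr =>
    if PySem.Chars.isdigit c then [c]
    else
      let t := tempStr ++ [c]
      if t ∈ writtenNums then
        PySem.Int.toChars ((((PySem.List.index? writtenNums t).getD 0 : Nat) : Int) + 1)
      else if getAllSubstrings t ≠ 0 then PySem.Int.toChars (getAllSubstrings t)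
      else loopA rest t

def number_in_text_left (text : String) : String := String.ofList (loopA text.toList [])

-- ===== PORT B =====
-- helper of B: first (index+1) of a word of ws that is a suffix of prefix p; k counts from 1
def findSuffixB (p : List Char) : List (List Char) → Int → Option Int
  | [], _ => none
  | w :: ws, k => if PySem.Chars.endswith p w then some k else findSuffixB p ws (k + 1)

def loopB : List Char → List Char → List Char
  | _, [] => []
  | pref, c :: rest =>
    if PySem.Chars.isdigit c then [c]
    else
      match findSuffixB (pref ++ [c]) writtenNums 1 with
      | some v => PySem.Int.toChars v
      | none => loopB (pref ++ [c]) rest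

def number_in_text_left_alt (text : String) : String := String.ofList (loopB [] text.toList)

-- ===== PRECONDITION & SPEC =====
def Spec_number_in_text_left (text : String) (out : String) : Prop := out = number_in_text_left_alt text
instance (text : String) (out : String) : Decidable (Spec_number_in_text_left text out) := by unfold Spec_number_in_text_left; infer_instance

-- ===== CLAIM (what is proved, stated in full; the proofs are below) =====
def Claim_equal_number_in_text_left : Prop := ∀ (text : String), Dom_number_in_text_left text → Spec_number_in_text_left text (number_in_text_left text)

-- ===== LEMMAS AND PROOFS =====

-- invariant: no number word occurs inside the processed prefix
def NoWordIn (t : List Char) : Prop := ∀ w ∈ writtenNums, ¬ w <:+: t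

-- A's branch value / B's found value for a word w: its position in writtenNums plus one
def idxVal (w : List Char) : Int := (((PySem.List.index? writtenNums w).getD 0 : Nat) : Int) + 1

theorem word_ne_nil : ∀ w ∈ writtenNums, w ≠ [] := by decide

theorem word_suffix_word : ∀ w₁ ∈ writtenNums, ∀ w₂ ∈ writtenNums, w₁ <:+ w₂ → w₁ = w₂ := by decide

theorem suffix_unique {p w₁ w₂ : List Char} (h₁ : w₁ ∈ writtenNums) (h₂ : w₂ ∈ writtenNums)
    (hs₁ : w₁ <:+ p) (hs₂ : w₂ <:+ p) : w₁ = w₂ := by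
  rcases List.suffix_or_suffix_of_suffix hs₁ hs₂ with h | h
  · exact word_suffix_word _ h₁ _ h₂ h
  · exact (word_suffix_word _ h₂ _ h₁ h).symm

theorem take_drop_infix (l : List Char) (a b : Nat) : (l.drop a).take b <:+: l :=
  ((l.drop a).take_prefix b).isInfix.trans (l.drop_suffix a).isInfix

theorem infix_concat {w t : List Char} {c : Char} (h : w <:+: t ++ [c]) :
    w <:+: t ∨ w <:+ t ++ [c] := by
  obtain ⟨s1, s2, he⟩ := h
  rcases List.eq_nil_or_concat s2 with rfl | ⟨s2', d, rfl⟩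
  · right; exact ⟨s1, by simpa using he⟩
  · have he' : (s1 ++ (w ++ s2')) ++ [d] = t ++ [c] := by
      simpa [List.append_assoc] using he
    have ht : s1 ++ (w ++ s2') = t := by
      have := congrArg List.dropLast he'; simpa using this
    left; exact ⟨s1, s2', by simp [← ht]⟩

-- the substring list A's helper builds, as a flatMap
def substrL (t : List Char) : List (List Char) :=
  (PySem.List.pyRange 0 (t.length : Int) 1).flatMap (fun i =>
    (PySem.List.pyRange (i + 1) ((t.length : Int) + 1) 1).map
      (fun j => PySem.List.slice t (some i) (some j)))

theorem getAllSubstrings_eq (t : List Char) : getAllSubstrings t = scanItemsA (substrL t) := by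
  unfold getAllSubstrings substrL
  simp only [PySem.List.foldl_append_singleton_eq_map, PySem.List.foldl_append_eq_flatMap,
    List.nil_append]

theorem mem_substrL_infix {t s : List Char} (h : s ∈ substrL t) : s <:+: t := by
  unfold substrL at h
  simp only [List.mem_flatMap, List.mem_map, PySem.List.mem_pyRange_one] at h
  obtain ⟨i, ⟨hi0, hin⟩, j, ⟨hj1, hjn⟩, rfl⟩ := h
  rw [PySem.List.slice_toNat t hi0 (by omega)]
  exact take_drop_infix t i.toNat (j.toNat - i.toNat)

theorem word_mem_substrL {t w : List Char} (hne : w ≠ []) (hle : w.length ≤ t.length)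
    (hs : w <:+ t) : w ∈ substrL t := by
  unfold substrL
  simp only [List.mem_flatMap, List.mem_map, PySem.List.mem_pyRange_one]
  have hw0 : 0 < w.length := List.length_pos_iff.mpr hne
  refine ⟨((t.length - w.length : Nat) : Int), ⟨by omega, by omega⟩,
    (t.length : Int), ⟨by omega, by omega⟩, ?_⟩
  rw [PySem.List.slice_toNat t (by omega) (by omega)]
  have hdrop : t.drop (t.length - w.length) = w := (List.suffix_iff_eq_drop.mp hs).symm
  rw [show (((t.length - w.length : Nat) : Int)).toNat = t.length - w.length by omega,
    show ((t.length : Int)).toNat = t.length by omega, hdrop,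
    show t.length - (t.length - w.length) = w.length from by omega]
  exact List.take_length

theorem scanItemsA_eq_zero {l : List (List Char)} (h : ∀ s ∈ l, s ∉ writtenNums) :
    scanItemsA l = 0 := by
  induction l with
  | nil => rfl
  | cons s rest ih =>
    rw [scanItemsA, if_neg (h s (by simp))]
    exact ih (fun u hu => h u (by simp [hu]))

theorem scanItemsA_eq_idxVal {l : List (List Char)} {w : List Char} (hmem : w ∈ writtenNums)
    (hw : w ∈ l) (huniq : ∀ s ∈ l, s ∈ writtenNums → s = w) : scanItemsA l = idxVal w := by
  induction l with
  | nil => cases hw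
  | cons s rest ih =>
    by_cases hsm : s ∈ writtenNums
    · rw [scanItemsA, if_pos hsm, huniq s (by simp) hsm]; rfl
    · rw [scanItemsA, if_neg hsm]
      rcases List.mem_cons.mp hw with rfl | hw'
      · exact absurd hmem hsm
      · exact ih hw' (fun u hu hum => huniq u (by simp [hu]) hum)

theorem idxVal_pos (w : List Char) : 0 < idxVal w := by unfold idxVal; omega

theorem findSuffixB_none {p : List Char} :
    ∀ ws : List (List Char), (∀ w ∈ ws, ¬ w <:+ p) → ∀ k, findSuffixB p ws k = none := by
  intro ws
  induction ws with
  | nil => intro _ k; rfl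
  | cons u ws' ih =>
    intro h k
    rw [findSuffixB, if_neg (by
      intro hc
      exact h u (by simp) ((PySem.Chars.endswith_iff _ _).mp hc))]
    exact ih (fun u hu => h u (by simp [hu])) (k + 1)

theorem findSuffixB_spec {p w : List Char} :
    ∀ ws : List (List Char), (∀ u ∈ ws, u <:+ p → u = w) → w ∈ ws → w <:+ p → ∀ k,
      findSuffixB p ws k = some (k + ((PySem.List.index? ws w).getD 0 : Nat)) := by
  intro ws
  induction ws with
  | nil => intro _ h; cases h
  | cons u ws' ih =>
    intro huniq hw hs k
    by_cases hend : u <:+ p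
    · have : u = w := huniq u (by simp) hend
      subst this
      rw [findSuffixB, if_pos ((PySem.Chars.endswith_iff _ _).mpr hend),
        PySem.List.index?_cons_self]
      simp
    · have hne : u ≠ w := fun he => hend (he ▸ hs)
      have hw' : w ∈ ws' := by
        rcases List.mem_cons.mp hw with heq | h
        · exact absurd heq.symm hne
        · exact h
      rw [findSuffixB, if_neg (by
          intro hc
          exact hend ((PySem.Chars.endswith_iff _ _).mp hc)),
        ih (fun u hu hup => huniq u (by simp [hu]) hup) hw' hs (k + 1),
        PySem.List.index?_cons_of_ne ws' hne]
      obtain ⟨j, hj⟩ := Option.isSome_iff_exists.mp ((PySem.List.index?_isSome_iff ws' w).mpr hw')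
      rw [hj]
      simp
      omega

theorem main_loops_eq : ∀ rest t, NoWordIn t → loopA rest t = loopB t rest := by
  intro rest
  induction rest with
  | nil => intro t _; rfl
  | cons c rest ih =>
    intro t hinv
    by_cases hd : PySem.Chars.isdigit c
    · rw [loopA, loopB, if_pos hd, if_pos hd]
    · rw [loopA, loopB, if_neg hd, if_neg hd]
      by_cases hex : ∃ w ∈ writtenNums, w <:+ t ++ [c]
      · obtain ⟨w, hwmem, hwsuf⟩ := hex
        have huniq : ∀ u ∈ writtenNums, u <:+ t ++ [c] → u = w :=
          fun u hu hs => suffix_unique hu hwmem hs hwsuf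
        have hB : findSuffixB (t ++ [c]) writtenNums 1 = some (idxVal w) := by
          rw [findSuffixB_spec writtenNums huniq hwmem hwsuf 1]
          unfold idxVal; congr 1; omega
        rw [hB]
        by_cases hmem : (t ++ [c]) ∈ writtenNums
        · rw [if_pos hmem, huniq (t ++ [c]) hmem List.suffix_rfl]; rfl
        · have hgas : getAllSubstrings (t ++ [c]) = idxVal w := by
            rw [getAllSubstrings_eq]
            refine scanItemsA_eq_idxVal hwmem
              (word_mem_substrL (word_ne_nil w hwmem) hwsuf.length_le hwsuf) ?_
            intro s hs hsm
            rcases infix_concat (mem_substrL_infix hs) with h | h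
            · exact absurd h (hinv s hsm)
            · exact huniq s hsm h
          rw [if_neg hmem, if_pos (by rw [hgas]; exact ne_of_gt (idxVal_pos w)), hgas]
      · push Not at hex
        have hmem : (t ++ [c]) ∉ writtenNums := fun h => hex _ h List.suffix_rfl
        have hgas : getAllSubstrings (t ++ [c]) = 0 := by
          rw [getAllSubstrings_eq]
          refine scanItemsA_eq_zero ?_
          intro s hs hsm
          rcases infix_concat (mem_substrL_infix hs) with h | h
          · exact hinv s hsm h
          · exact hex s hsm h
        rw [findSuffixB_none writtenNums hex 1, if_neg hmem, if_neg (by simp [hgas])]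
        exact ih (t ++ [c]) (by
          intro u hu hinf
          rcases infix_concat hinf with h | h
          · exact hinv u hu h
          · exact hex u hu h)

-- ===== VERDICT (by name: the statement is the Claim_ definition above) =====
theorem number_in_text_left_spec : Claim_equal_number_in_text_left := by
  intro text _
  show String.ofList (loopA text.toList []) = String.ofList (loopB [] text.toList)
  rw [main_loops_eq text.toList [] (fun w hw h => word_ne_nil w hw (List.eq_nil_of_infix_nil h))]
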